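-- pv_equiv track=rewrite | github.com/Checco24fra/library_GitGud | newfun.py | book_pages
-- ===== SOURCE A (Python) =====
-- def book_pages(number_of_p):
--
--     """
--     Function to find the book with less pages that number_of_p parameter
--     """
--
--     books_length = {'Romeo and Juliet': 322,  # New dictionary
--                     '1984': 340,
--                     '2001: a Space Odyssey': 250,
--                     'Pride and Prejudice': 450,
--                     'The Great Gatsby': 200,
--                     'The Lord of the Rings': 1100,
--                     'The Old Man and the Sea': 100,
--                     'The Picture of Dorian Gray': 300,
--                     'A Christmas Carol': 125}
--
--     max_pages = 0                               # Initialise variables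
--     book = None
--     for k, v in books_length.items():            # Iteration
--         # If found new book with more pages than the
--         # previous best assign to update variable book
--         if v < number_of_p and max_pages < v:
--             max_pages = v
--             book = k
--     # Return
--     a = f'The book with most pages less than {number_of_p}'
--     b = f'is {book} with {max_pages}'
--     return a+b
-- ===== SOURCE B (Python) =====
-- def book_pages(number_of_p):
--     """
--     Function to find the book with less pages that number_of_p parameter
--     """
--     books_length = {'Romeo and Juliet': 322,
--                     '1984': 340,
--                     '2001: a Space Odyssey': 250,
--                     'Pride and Prejudice': 450,
--                     'The Great Gatsby': 200,
--                     'The Lord of the Rings': 1100,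
--                     'The Old Man and the Sea': 100,
--                     'The Picture of Dorian Gray': 300,
--                     'A Christmas Carol': 125}
--     # staged: first the qualifying page counts, then their max, then the name lookup
--     under = [v for v in books_length.values() if v < number_of_p]
--     book, max_pages = None, 0
--     if under:
--         max_pages = max(under)
--         book = next(k for k, v in books_length.items() if v == max_pages)
--     a = f'The book with most pages less than {number_of_p}'
--     b = f'is {book} with {max_pages}'
--     return a+b
-- ===== Notes on version B (the rewrite author's own statement) =====
-- stated objective: alternative
-- what changed: Replaces A's single running-max scan over key/value pairs with a staged decomposition: filter the page counts below the threshold, take their max, then look the winning title up by its page count.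
import Mathlib
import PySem

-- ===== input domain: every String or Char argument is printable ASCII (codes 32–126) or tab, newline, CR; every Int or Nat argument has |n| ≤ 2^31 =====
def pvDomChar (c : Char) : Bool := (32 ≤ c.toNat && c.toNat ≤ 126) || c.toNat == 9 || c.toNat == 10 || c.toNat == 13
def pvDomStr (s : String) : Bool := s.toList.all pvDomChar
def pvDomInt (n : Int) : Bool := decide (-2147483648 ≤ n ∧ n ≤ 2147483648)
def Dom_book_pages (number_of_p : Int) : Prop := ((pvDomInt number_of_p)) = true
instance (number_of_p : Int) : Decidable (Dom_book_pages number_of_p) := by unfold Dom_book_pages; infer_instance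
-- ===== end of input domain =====

-- B replaces A's running-max scan with a staged filter-then-max-then-lookup decomposition (alternative, same result).


-- ===== PORT A =====
-- the module's literal dictionary of book lengths, in insertion order
def pvBooksLength : List (String × Int) :=
  [("Romeo and Juliet", 322), ("1984", 340), ("2001: a Space Odyssey", 250),
   ("Pride and Prejudice", 450), ("The Great Gatsby", 200), ("The Lord of the Rings", 1100),
   ("The Old Man and the Sea", 100), ("The Picture of Dorian Gray", 300), ("A Christmas Carol", 125)]

def pvShowBook : Option String → String
  | none => "None"
  | some k => k

-- A: single scan keeping the running max (max_pages, book)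
def book_pages (number_of_p : Int) : String :=
  let st := pvBooksLength.foldl
    (fun (s : Int × Option String) kv =>
      if kv.2 < number_of_p ∧ s.1 < kv.2 then (kv.2, some kv.1) else s)
    (0, none)
  let a := "The book with most pages less than " ++ PySem.Int.toStr number_of_p
  let b := "is " ++ pvShowBook st.2 ++ " with " ++ PySem.Int.toStr st.1
  a ++ b

-- ===== PORT B =====
-- B: filter the page counts below the threshold, take their max, look the title up by count
def book_pages_alt (number_of_p : Int) : String :=
  let under := (pvBooksLength.map Prod.snd).filter (fun v => decide (v < number_of_p))
  let bm : Option String × Int :=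
    match PySem.List.max? under (fun x => x) with
    | none => (none, 0)
    | some m => ((pvBooksLength.find? (fun kv => kv.2 == m)).map Prod.fst, m)
  let a := "The book with most pages less than " ++ PySem.Int.toStr number_of_p
  let b := "is " ++ pvShowBook bm.1 ++ " with " ++ PySem.Int.toStr bm.2
  a ++ b

-- ===== PRECONDITION & SPEC =====
def Spec_book_pages (number_of_p : Int) (out : String) : Prop := out = book_pages_alt number_of_p
instance (number_of_p : Int) (out : String) : Decidable (Spec_book_pages number_of_p out) := by unfold Spec_book_pages; infer_instance

-- ===== CLAIM (what is proved, stated in full; the proofs are below) =====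
def Claim_equal_book_pages : Prop := ∀ (number_of_p : Int), Dom_book_pages number_of_p → Spec_book_pages number_of_p (book_pages number_of_p)

-- ===== LEMMAS AND PROOFS =====

-- ===== VERDICT (by name: the statement is the Claim_ definition above) =====
theorem book_pages_spec : Claim_equal_book_pages := by
  intro n _
  unfold Spec_book_pages book_pages book_pages_alt
  by_cases h0 : n ≤ 100
  · simp [pvBooksLength, pvShowBook, List.foldl, List.filter, PySem.List.max?, show ¬ (100:Int) < n from by omega, show ¬ (125:Int) < n from by omega, show ¬ (200:Int) < n from by omega, show ¬ (250:Int) < n from by omega, show ¬ (300:Int) < n from by omega, show ¬ (322:Int) < n from by omega, show ¬ (340:Int) < n from by omega, show ¬ (450:Int) < n from by omega, show ¬ (1100:Int) < n from by omega]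
  by_cases h1 : n ≤ 125
  · simp [pvBooksLength, pvShowBook, List.foldl, List.filter, PySem.List.max?, List.find?, show (100:Int) < n from by omega, show ¬ (125:Int) < n from by omega, show ¬ (200:Int) < n from by omega, show ¬ (250:Int) < n from by omega, show ¬ (300:Int) < n from by omega, show ¬ (322:Int) < n from by omega, show ¬ (340:Int) < n from by omega, show ¬ (450:Int) < n from by omega, show ¬ (1100:Int) < n from by omega]
  by_cases h2 : n ≤ 200
  · simp [pvBooksLength, pvShowBook, List.foldl, List.filter, PySem.List.max?, List.find?, show (100:Int) < n from by omega, show (125:Int) < n from by omega, show ¬ (200:Int) < n from by omega, show ¬ (250:Int) < n from by omega, show ¬ (300:Int) < n from by omega, show ¬ (322:Int) < n from by omega, show ¬ (340:Int) < n from by omega, show ¬ (450:Int) < n from by omega, show ¬ (1100:Int) < n from by omega]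
  by_cases h3 : n ≤ 250
  · simp [pvBooksLength, pvShowBook, List.foldl, List.filter, PySem.List.max?, List.find?, show (100:Int) < n from by omega, show (125:Int) < n from by omega, show (200:Int) < n from by omega, show ¬ (250:Int) < n from by omega, show ¬ (300:Int) < n from by omega, show ¬ (322:Int) < n from by omega, show ¬ (340:Int) < n from by omega, show ¬ (450:Int) < n from by omega, show ¬ (1100:Int) < n from by omega]
  by_cases h4 : n ≤ 300
  · simp [pvBooksLength, pvShowBook, List.foldl, List.filter, PySem.List.max?, List.find?, show (100:Int) < n from by omega, show (125:Int) < n from by omega, show (200:Int) < n from by omega, show (250:Int) < n from by omega, show ¬ (300:Int) < n from by omega, show ¬ (322:Int) < n from by omega, show ¬ (340:Int) < n from by omega, show ¬ (450:Int) < n from by omega, show ¬ (1100:Int) < n from by omega]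
  by_cases h5 : n ≤ 322
  · simp [pvBooksLength, pvShowBook, List.foldl, List.filter, PySem.List.max?, List.find?, show (100:Int) < n from by omega, show (125:Int) < n from by omega, show (200:Int) < n from by omega, show (250:Int) < n from by omega, show (300:Int) < n from by omega, show ¬ (322:Int) < n from by omega, show ¬ (340:Int) < n from by omega, show ¬ (450:Int) < n from by omega, show ¬ (1100:Int) < n from by omega]
  by_cases h6 : n ≤ 340
  · simp [pvBooksLength, pvShowBook, List.foldl, List.filter, PySem.List.max?, show (100:Int) < n from by omega, show (125:Int) < n from by omega, show (200:Int) < n from by omega, show (250:Int) < n from by omega, show (300:Int) < n from by omega, show (322:Int) < n from by omega, show ¬ (340:Int) < n from by omega, show ¬ (450:Int) < n from by omega, show ¬ (1100:Int) < n from by omega]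
  by_cases h7 : n ≤ 450
  · simp [pvBooksLength, pvShowBook, List.foldl, List.filter, PySem.List.max?, List.find?, show (100:Int) < n from by omega, show (125:Int) < n from by omega, show (200:Int) < n from by omega, show (250:Int) < n from by omega, show (300:Int) < n from by omega, show (322:Int) < n from by omega, show (340:Int) < n from by omega, show ¬ (450:Int) < n from by omega, show ¬ (1100:Int) < n from by omega]
  by_cases h8 : n ≤ 1100
  · simp [pvBooksLength, pvShowBook, List.foldl, List.filter, PySem.List.max?, List.find?, show (100:Int) < n from by omega, show (125:Int) < n from by omega, show (200:Int) < n from by omega, show (250:Int) < n from by omega, show (300:Int) < n from by omega, show (322:Int) < n from by omega, show (340:Int) < n from by omega, show (450:Int) < n from by omega, show ¬ (1100:Int) < n from by omega]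
  simp [pvBooksLength, pvShowBook, List.foldl, List.filter, PySem.List.max?, List.find?, show (100:Int) < n from by omega, show (125:Int) < n from by omega, show (200:Int) < n from by omega, show (250:Int) < n from by omega, show (300:Int) < n from by omega, show (322:Int) < n from by omega, show (340:Int) < n from by omega, show (450:Int) < n from by omega, show (1100:Int) < n from by omega]
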